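-- pv_equiv track=rewrite | github.com/daviesombasa/100-Days-of-Code | day_6.py | alternate_odd
-- ===== SOURCE A (Python) =====
-- def alternate_odd(limit):
--     total_sum = 0
--     odd_numbers = []
--     for number in range(1, limit):
--         if number % 2 != 0:
--             odd_numbers.append(number)
--     for item in odd_numbers:
--         if odd_numbers.index(item) % 2 == 0:
--             total_sum += item
--     return total_sum
-- ===== SOURCE B (Python) =====
-- def alternate_odd(limit):
--     # The odd numbers below limit that sit at even positions of the odd list are
--     # exactly those congruent to one modulo four; there are
--     # k = max(0, (limit + 2) // 4) of them and their sum is k*(2k-1).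
--     k = max(0, (limit + 2) // 4)
--     return k * (2 * k - 1)
-- ===== Notes on version B (the rewrite author's own statement) =====
-- stated objective: faster
-- what changed: Replaced the build-a-list-of-odds loop plus a second loop calling list.index on every element by the closed-form k*(2k-1) with k = max(0, (limit+2)//4), since the summed elements are exactly the numbers ≡ 1 mod 4 below limit.
import Mathlib
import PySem

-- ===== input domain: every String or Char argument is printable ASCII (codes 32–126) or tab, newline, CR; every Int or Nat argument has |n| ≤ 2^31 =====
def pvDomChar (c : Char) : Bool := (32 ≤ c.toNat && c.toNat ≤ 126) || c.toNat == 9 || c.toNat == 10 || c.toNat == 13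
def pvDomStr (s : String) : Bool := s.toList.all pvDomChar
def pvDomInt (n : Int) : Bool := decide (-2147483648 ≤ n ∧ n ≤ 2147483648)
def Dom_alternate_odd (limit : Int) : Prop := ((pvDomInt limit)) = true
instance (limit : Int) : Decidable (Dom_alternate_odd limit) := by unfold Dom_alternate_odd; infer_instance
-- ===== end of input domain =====

-- B replaces A's quadratic list-build + repeated .index scan by the closed form
-- k*(2k-1) with k = max(0, (limit+2)//4); objective: faster (O(1) vs O(n^2)).

-- ===== PORT A =====
def alternate_odd (limit : Int) : Int :=
  let total_sum : Int := 0
  let odd_numbers : List Int := []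
  let odd_numbers := (PySem.List.pyRange 1 limit 1).foldl
    (fun acc number => if number % 2 ≠ 0 then acc ++ [number] else acc) odd_numbers
  let total_sum := odd_numbers.foldl
    (fun total item =>
      if ((PySem.List.index? odd_numbers item).getD 0) % 2 == 0 then total + item else total)
    total_sum
  total_sum

-- ===== PORT B =====
def alternate_odd_alt (limit : Int) : Int :=
  let k : Int := max 0 (PySem.Int.floordiv (limit + 2) 4)
  k * (2 * k - 1)

-- ===== PRECONDITION & SPEC =====
def Spec_alternate_odd (limit : Int) (out : Int) : Prop := out = alternate_odd_alt limit
instance (limit : Int) (out : Int) : Decidable (Spec_alternate_odd limit out) := by unfold Spec_alternate_odd; infer_instance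

-- ===== CLAIM (what is proved, stated in full; the proofs are below) =====
def Claim_equal_alternate_odd : Prop := ∀ (limit : Int), Dom_alternate_odd limit → Spec_alternate_odd limit (alternate_odd limit)

-- ===== LEMMAS AND PROOFS =====

-- odds among 1..t (shifted by 1 from range) are 2*i+1 for i < (t+1)/2
theorem pv_filter_odds (t : Nat) :
    ((List.range t).map (fun (k : Nat) => (1:Int) + k)).filter (fun n => decide (n % 2 ≠ 0))
      = (List.range ((t+1)/2)).map (fun (i : Nat) => 2*(i:Int)+1) := by
  induction t with
  | zero => simp
  | succ t ih =>
    rw [List.range_succ, List.map_append, List.map_singleton, List.filter_append, ih]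
    by_cases h : (1 + (t:Int)) % 2 ≠ 0
    · have h2 : (t+1+1)/2 = (t+1)/2 + 1 := by omega
      have h3 : (t+1)/2 = t/2 := by omega
      have ht : (1 + (t:Int)) % 2 = 1 := by omega
      have hfil : List.filter (fun n => decide (n % 2 ≠ 0)) [1+(t:Int)] = [1+(t:Int)] := by
        simp [ht]
      rw [hfil, h2, List.range_succ, List.map_append, h3]
      have hv : (1:Int)+(t:Int) = 2*((t/2 : Nat):Int)+1 := by omega
      rw [hv]
      simp
    · have h2 : (t+1+1)/2 = (t+1)/2 := by omega
      have ht : (1 + (t:Int)) % 2 = 0 := by omega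
      have hfil : List.filter (fun n => decide (n % 2 ≠ 0)) [1+(t:Int)] = [] := by
        simp [ht]
      rw [hfil, List.append_nil, h2]

-- index of f i in (range m).map f is i, for injective f
theorem pv_index_map_range (f : Nat → Int) (hf : Function.Injective f) :
    ∀ m i, i < m → PySem.List.index? ((List.range m).map f) (f i) = some i := by
  intro m
  induction m with
  | zero => intro i hi; omega
  | succ m ih =>
    intro i hi
    rw [List.range_succ, List.map_append, List.map_singleton]
    by_cases h : i < m
    · rw [PySem.List.index?_append_of_mem]
      · exact ih i h
      · simp only [List.mem_map, List.mem_range]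
        exact ⟨i, h, rfl⟩
    · have : i = m := by omega
      subst this
      rw [PySem.List.index?_append_singleton_self]
      · simp
      · simp only [List.mem_map, List.mem_range]
        rintro ⟨j, hj, hje⟩
        exact absurd (hf hje) (by omega)

-- the second loop over the characterized odd list, in closed form
theorem pv_sum_loop (m : Nat) :
    (List.range m).foldl
        (fun (tot : Int) (i : Nat) => if i % 2 == 0 then tot + (2*(i:Int)+1) else tot) 0
      = (((m+1)/2 : Nat) : Int) * (2 * (((m+1)/2 : Nat) : Int) - 1) := by
  induction m with
  | zero => simp
  | succ m ih =>
    rw [List.range_succ, List.foldl_append, ih, List.foldl_cons, List.foldl_nil]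
    by_cases h : (m % 2 == 0) = true
    · have hm : m % 2 = 0 := by simpa using h
      rw [if_pos h]
      have h1 : (m+1)/2 = m/2 := by omega
      have h2 : (m+1+1)/2 = m/2 + 1 := by omega
      rw [h1, h2]
      obtain ⟨j, hj⟩ : ∃ j, m = 2 * j := ⟨m/2, by omega⟩
      subst hj
      have h3 : 2*j/2 = j := by omega
      rw [h3]
      push_cast
      ring
    · have hm : m % 2 = 1 := by simpa using h
      have h2 : (m+1+1)/2 = (m+1)/2 := by omega
      rw [if_neg h, h2]

theorem pv_two_inj : Function.Injective (fun i : Nat => 2*(i:Int)+1) := by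
  intro a b h; simp only at h; omega

theorem alternate_odd_eq_closed (limit : Int) :
    alternate_odd limit
      = ((((limit-1).toNat + 1)/2 + 1)/2 : Nat) * (2 * (((((limit-1).toNat + 1)/2 + 1)/2 : Nat) : Int) - 1) := by
  unfold alternate_odd
  simp only
  rw [PySem.List.foldl_append_ite_eq_filter, PySem.List.pyRange_one]
  simp only [List.nil_append]
  rw [pv_filter_odds]
  set m := (((limit-1).toNat + 1)/2 : Nat) with hm
  rw [List.foldl_map]
  refine Eq.trans ?_ (pv_sum_loop m)
  apply List.foldl_ext
  intro a x hx
  simp only [pv_index_map_range _ pv_two_inj m x (List.mem_range.mp hx), Option.getD_some]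

theorem alternate_odd_alt_eq_closed (limit : Int) :
    alternate_odd_alt limit
      = ((((limit-1).toNat + 1)/2 + 1)/2 : Nat) * (2 * (((((limit-1).toNat + 1)/2 + 1)/2 : Nat) : Int) - 1) := by
  unfold alternate_odd_alt
  have h : max 0 (PySem.Int.floordiv (limit + 2) 4)
      = (((((limit-1).toNat + 1)/2 + 1)/2 : Nat) : Int) := by
    have hf : PySem.Int.floordiv (limit + 2) 4 = (limit + 2) / 4 := by
      simp [PySem.Int.floordiv, Int.fdiv_eq_ediv]
    rw [hf]; omega
  simp only [h]

-- ===== VERDICT (by name: the statement is the Claim_ definition above) =====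
theorem alternate_odd_spec : Claim_equal_alternate_odd := by
  intro limit _
  unfold Spec_alternate_odd
  rw [alternate_odd_eq_closed, alternate_odd_alt_eq_closed]
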